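-- pv_equiv track=rewrite | github.com/SaqlainSajid/NRCpreprocessing | province_splitter.py | get_province_boundaries
-- ===== SOURCE A (Python) =====
-- from typing import Dict, List, Optional
--
-- def get_province_boundaries(utm_zone: int) -> Dict[str, Dict]:
--     """
--     Get UTM boundaries for provinces in a specific UTM zone.
--     Returns a dictionary with province codes as keys and their UTM boundaries as values.
--     """
--     # Define boundaries for each province in different UTM zones
--     boundaries = {
--         # Alberta (UTM zones 11-12)
--         'AB': {
--             11: {'e': (250000, 750000), 'n': (5400000, 6300000)},
--             12: {'e': (250000, 750000), 'n': (5400000, 6300000)}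
--         },
--         # British Columbia (UTM zones 8-11)
--         'BC': {
--             8: {'e': (350000, 750000), 'n': (5400000, 6600000)},
--             9: {'e': (250000, 750000), 'n': (5400000, 6600000)},
--             10: {'e': (250000, 750000), 'n': (5400000, 6600000)},
--             11: {'e': (250000, 500000), 'n': (5400000, 6600000)}
--         },
--         # Saskatchewan (UTM zones 12-13)
--         'SK': {
--             12: {'e': (600000, 750000), 'n': (5400000, 6300000)},
--             13: {'e': (250000, 750000), 'n': (5400000, 6300000)}
--         },
--         # Manitoba (UTM zones 14-15)
--         'MB': {
--             14: {'e': (400000, 750000), 'n': (5400000, 6300000)},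
--             15: {'e': (250000, 500000), 'n': (5400000, 6300000)}
--         }
--         # Add more provinces as needed
--     }
--
--     # Return only the boundaries for the specified UTM zone
--     return {
--         province: bounds[utm_zone]
--         for province, bounds in boundaries.items()
--         if utm_zone in bounds
--     }
-- ===== SOURCE B (Python) =====
-- _BOUNDARIES_BY_ZONE = {
--     8:  {'BC': {'e': (350000, 750000), 'n': (5400000, 6600000)}},
--     9:  {'BC': {'e': (250000, 750000), 'n': (5400000, 6600000)}},
--     10: {'BC': {'e': (250000, 750000), 'n': (5400000, 6600000)}},
--     11: {'AB': {'e': (250000, 750000), 'n': (5400000, 6300000)},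
--          'BC': {'e': (250000, 500000), 'n': (5400000, 6600000)}},
--     12: {'AB': {'e': (250000, 750000), 'n': (5400000, 6300000)},
--          'SK': {'e': (600000, 750000), 'n': (5400000, 6300000)}},
--     13: {'SK': {'e': (250000, 750000), 'n': (5400000, 6300000)}},
--     14: {'MB': {'e': (400000, 750000), 'n': (5400000, 6300000)}},
--     15: {'MB': {'e': (250000, 500000), 'n': (5400000, 6300000)}},
-- }
--
-- def get_province_boundaries(utm_zone):
--     """Direct lookup in a table keyed by UTM zone (no per-province scan)."""
--     return dict(_BOUNDARIES_BY_ZONE.get(utm_zone, {}))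
-- ===== Notes on version B (the rewrite author's own statement) =====
-- stated objective: idiomatic
-- what changed: The constant table is re-keyed by UTM zone (zone -> {province: bounds}), so the per-province scan with a membership test is replaced by a single dict lookup with a default.
import Mathlib
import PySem

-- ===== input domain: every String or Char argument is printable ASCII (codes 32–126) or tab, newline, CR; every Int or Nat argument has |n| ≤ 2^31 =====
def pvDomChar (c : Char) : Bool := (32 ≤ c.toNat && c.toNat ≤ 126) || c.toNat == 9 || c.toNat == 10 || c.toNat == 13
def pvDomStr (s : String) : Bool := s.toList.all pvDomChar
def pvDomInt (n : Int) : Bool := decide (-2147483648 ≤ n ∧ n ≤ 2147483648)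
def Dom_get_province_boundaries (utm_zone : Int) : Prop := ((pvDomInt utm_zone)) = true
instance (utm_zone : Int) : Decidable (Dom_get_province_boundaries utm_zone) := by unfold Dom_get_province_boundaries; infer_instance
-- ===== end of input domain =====

-- B re-keys the constant table by UTM zone so the per-province scan becomes one lookup (idiomatic; same values).

-- ===== PORT A =====
-- A's constant: province -> (zone -> {'e': (lo,hi), 'n': (lo,hi)}); dicts as association lists (all keys distinct).
def pvBoundariesA : List (String × List (Int × List (String × Int × Int))) :=
  [ ("AB", [ (11, [("e", 250000, 750000), ("n", 5400000, 6300000)]),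
             (12, [("e", 250000, 750000), ("n", 5400000, 6300000)]) ]),
    ("BC", [ (8,  [("e", 350000, 750000), ("n", 5400000, 6600000)]),
             (9,  [("e", 250000, 750000), ("n", 5400000, 6600000)]),
             (10, [("e", 250000, 750000), ("n", 5400000, 6600000)]),
             (11, [("e", 250000, 500000), ("n", 5400000, 6600000)]) ]),
    ("SK", [ (12, [("e", 600000, 750000), ("n", 5400000, 6300000)]),
             (13, [("e", 250000, 750000), ("n", 5400000, 6300000)]) ]),
    ("MB", [ (14, [("e", 400000, 750000), ("n", 5400000, 6300000)]),
             (15, [("e", 250000, 500000), ("n", 5400000, 6300000)]) ]) ]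

-- the dict comprehension: keep (province, bounds[utm_zone]) when utm_zone ∈ bounds (first match = only match, keys distinct)
def get_province_boundaries (utm_zone : Int) : List (String × List (String × Int × Int)) :=
  pvBoundariesA.filterMap (fun pb => (pb.2.lookup utm_zone).map (fun v => (pb.1, v)))

-- ===== PORT B =====
-- B's constant: zone -> (province -> bounds)
def pvBoundariesByZone : List (Int × List (String × List (String × Int × Int))) :=
  [ (8,  [ ("BC", [("e", 350000, 750000), ("n", 5400000, 6600000)]) ]),
    (9,  [ ("BC", [("e", 250000, 750000), ("n", 5400000, 6600000)]) ]),
    (10, [ ("BC", [("e", 250000, 750000), ("n", 5400000, 6600000)]) ]),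
    (11, [ ("AB", [("e", 250000, 750000), ("n", 5400000, 6300000)]),
           ("BC", [("e", 250000, 500000), ("n", 5400000, 6600000)]) ]),
    (12, [ ("AB", [("e", 250000, 750000), ("n", 5400000, 6300000)]),
           ("SK", [("e", 600000, 750000), ("n", 5400000, 6300000)]) ]),
    (13, [ ("SK", [("e", 250000, 750000), ("n", 5400000, 6300000)]) ]),
    (14, [ ("MB", [("e", 400000, 750000), ("n", 5400000, 6300000)]) ]),
    (15, [ ("MB", [("e", 250000, 500000), ("n", 5400000, 6300000)]) ]) ]

def get_province_boundaries_alt (utm_zone : Int) : List (String × List (String × Int × Int)) :=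
  (pvBoundariesByZone.lookup utm_zone).getD []

-- ===== PRECONDITION & SPEC =====
def Spec_get_province_boundaries (utm_zone : Int) (out : List (String × List (String × Int × Int))) : Prop := out = get_province_boundaries_alt utm_zone
instance (utm_zone : Int) (out : List (String × List (String × Int × Int))) : Decidable (Spec_get_province_boundaries utm_zone out) := by unfold Spec_get_province_boundaries; infer_instance

-- ===== CLAIM (what is proved, stated in full; the proofs are below) =====
def Claim_equal_get_province_boundaries : Prop := ∀ (utm_zone : Int), Dom_get_province_boundaries utm_zone → Spec_get_province_boundaries utm_zone (get_province_boundaries utm_zone)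

-- ===== LEMMAS AND PROOFS =====

-- ===== VERDICT (by name: the statement is the Claim_ definition above) =====
theorem get_province_boundaries_spec : Claim_equal_get_province_boundaries := by
  intro z _
  unfold Spec_get_province_boundaries
  by_cases h : 8 ≤ z ∧ z ≤ 15
  · obtain ⟨h1, h2⟩ := h
    interval_cases z <;> decide
  · have h8 : (z == (8:Int)) = false := by simp; omega
    have h9 : (z == (9:Int)) = false := by simp; omega
    have h10 : (z == (10:Int)) = false := by simp; omega
    have h11 : (z == (11:Int)) = false := by simp; omega
    have h12 : (z == (12:Int)) = false := by simp; omega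
    have h13 : (z == (13:Int)) = false := by simp; omega
    have h14 : (z == (14:Int)) = false := by simp; omega
    have h15 : (z == (15:Int)) = false := by simp; omega
    simp [get_province_boundaries, get_province_boundaries_alt, pvBoundariesA,
      pvBoundariesByZone, List.lookup, h8, h9, h10, h11, h12, h13, h14, h15]
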